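-- pv_equiv track=rewrite | github.com/felixgravila/mastersthesis | src/utils/assembler.py | _find_alignment_index
-- ===== SOURCE A (Python) =====
-- from itertools import zip_longest
--
-- def _find_alignment_index(seq_list, seq_to_align):
--   if(len(seq_list) == 0):
--     return 0
--
--   max_score = 0
--   max_score_index = 0
--
--   alignment_from = _get_closest_index(seq_list)-len(seq_to_align)+1
--   alignment_to = _get_furthest_index(seq_list)-1
--
--   for i in range(alignment_from, alignment_to):
--     score = _calc_score(seq_list, seq_to_align, i)
--     if(score > max_score):
--       max_score, max_score_index = (score, i)
--   return max_score_index
--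
-- def _calc_score(seq_list, seq_to_align, index):
--   seq_list = seq_list.copy()
--
--   min_in_list = min(a for (a,_) in seq_list)
--   min_offset = min(min_in_list, index)
--
--   seq_list = [(a-min_offset, b) for (a,b) in seq_list]
--   index -= min_offset
--
--   # transforms into relative padded strings
--   padded_seq_list = _pad_seq_list(seq_list)
--   seq_to_align = " "*index+seq_to_align
--
--   # zip them for count(), if only one then just make lists of 1
--   if len(padded_seq_list) > 1:
--       zipped_list = list(zip_longest(*padded_seq_list, fillvalue=" "))
--   else:
--       zipped_list = [[a] for a in padded_seq_list[0]]
--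
--   counts = list(map(lambda x: x[1].count(x[0]) if x[0] != " " else 0, zip(seq_to_align, zipped_list)))
--   return sum(counts[index:])
--
-- def _get_furthest_index(seq_list):
--     return max([i+len(l) for (i,l) in seq_list])
--
-- def _get_closest_index(seq_list):
--     return min([i for (i,l) in seq_list])
--
-- def _pad_seq_list(seq_list):
--   return [" "*a+b for (a,b) in seq_list]
-- ===== SOURCE B (Python) =====
-- def _find_alignment_index(seq_list, seq_to_align):
--   if not seq_list:
--     return 0
--   # one pass over all sequence characters: count, per absolute position,
--   # how many sequences carry each (non-space) character there
--   table = {}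
--   for start, s in seq_list:
--     for k, ch in enumerate(s):
--       if ch != ' ':
--         key = (start + k, ch)
--         table[key] = table.get(key, 0) + 1
--   lo = min(start for start, _ in seq_list) - len(seq_to_align) + 1
--   hi = max(start + len(s) for start, s in seq_list) - 1
--   best_score = 0
--   best_index = 0
--   for i in range(lo, hi):
--     score = 0
--     for p, ch in enumerate(seq_to_align):
--       if ch != ' ':
--         score += table.get((i + p, ch), 0)
--     if score > best_score:
--       best_score, best_index = score, i
--   return best_index
-- ===== Notes on version B (the rewrite author's own statement) =====
-- stated objective: faster
-- what changed: A re-pads all sequences, transposes them with zip_longest and counts per-column tuple matches anew for every candidate index; B scans the sequences once to build a dict counting each (absolute position, character) occurrence and then scores every candidate index by direct dict lookups along the query.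
import Mathlib
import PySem

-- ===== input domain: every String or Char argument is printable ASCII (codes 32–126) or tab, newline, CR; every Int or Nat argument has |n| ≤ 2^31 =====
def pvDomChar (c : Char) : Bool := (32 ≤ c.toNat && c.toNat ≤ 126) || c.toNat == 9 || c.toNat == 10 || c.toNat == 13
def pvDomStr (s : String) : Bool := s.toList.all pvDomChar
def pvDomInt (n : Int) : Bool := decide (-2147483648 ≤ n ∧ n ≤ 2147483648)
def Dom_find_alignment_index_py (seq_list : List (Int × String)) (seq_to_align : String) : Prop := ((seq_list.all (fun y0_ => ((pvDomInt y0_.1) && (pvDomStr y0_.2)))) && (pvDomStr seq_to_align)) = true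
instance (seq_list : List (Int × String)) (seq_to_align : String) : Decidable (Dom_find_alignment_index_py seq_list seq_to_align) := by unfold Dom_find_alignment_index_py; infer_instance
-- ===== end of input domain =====

-- B replaces A's per-candidate padding/zip_longest/column-count rebuild by one precomputed
-- (position, char) → multiplicity table looked up while sliding the query; same return value.

-- ===== PORT A =====
-- strings are handled on the List Char side throughout (PySem convention)

-- min([i for (i,l) in seq_list])  (caller guarantees nonempty; getD 0 is never the raising case here)
def pv_get_closest (seq_list : List (Int × List Char)) : Int :=
  (PySem.List.min? (seq_list.map (fun il => il.1)) (fun x => x)).getD 0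

-- max([i+len(l) for (i,l) in seq_list])
def pv_get_furthest (seq_list : List (Int × List Char)) : Int :=
  (PySem.List.max? (seq_list.map (fun il => il.1 + (il.2.length : Int))) (fun x => x)).getD 0

-- [" "*a+b for (a,b) in seq_list]  (" "*a = "" for a ≤ 0, exactly Python's)
def pv_pad_seq_list (seq_list : List (Int × List Char)) : List (List Char) :=
  seq_list.map (fun ab => List.replicate ab.1.toNat ' ' ++ ab.2)

-- itertools.zip_longest(*ls, fillvalue=" "): hand port, exact — column j holds, for each
-- sequence, its j-th char or the fill; width = longest sequence
def pvZipLongest (ls : List (List Char)) : List (List Char) :=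
  (List.range (ls.foldl (fun acc s => max acc s.length) 0)).map
    (fun j => ls.map (fun s => s.getD j ' '))

def pv_calc_score (seq_list : List (Int × List Char)) (seq_to_align : List Char) (index : Int) : Int :=
  let min_in_list := (PySem.List.min? (seq_list.map (fun a_ => a_.1)) (fun x => x)).getD 0
  let min_offset := min min_in_list index
  let seq_list2 := seq_list.map (fun ab => (ab.1 - min_offset, ab.2))
  let index2 := index - min_offset
  let padded_seq_list := pv_pad_seq_list seq_list2
  let seq_to_align2 := List.replicate index2.toNat ' ' ++ seq_to_align
  let zipped_list := if padded_seq_list.length > 1 then pvZipLongest padded_seq_list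
                     else (padded_seq_list.getD 0 []).map (fun a => [a])
  let counts := (seq_to_align2.zip zipped_list).map
    (fun x => if x.1 ≠ ' ' then (x.2.count x.1 : Int) else 0)
  (PySem.List.slice counts (some index2) none).sum

def find_alignment_index_py (seq_list : List (Int × String)) (seq_to_align : String) : Int :=
  if seq_list.length = 0 then 0 else
  let sl := seq_list.map (fun ab => (ab.1, ab.2.toList))
  let alignment_from := pv_get_closest sl - (seq_to_align.toList.length : Int) + 1
  let alignment_to := pv_get_furthest sl - 1
  ((PySem.List.pyRange alignment_from alignment_to 1).foldl
    (fun st i =>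
      let score := pv_calc_score sl seq_to_align.toList i
      if score > st.1 then (score, i) else st) ((0 : Int), (0 : Int))).2

-- ===== PORT B =====
-- table[(start+k, ch)] += 1 over all non-space sequence characters
def pv_table (sl : List (Int × List Char)) : PySem.Dict (Int × Char) Int :=
  sl.foldl (fun d ab =>
    (PySem.List.enumerate ab.2 0).foldl (fun d kc =>
      if kc.2 ≠ ' ' then d.insert (ab.1 + kc.1, kc.2) (d.getD (ab.1 + kc.1, kc.2) 0 + 1) else d) d)
    PySem.Dict.empty

def find_alignment_index_py_alt (seq_list : List (Int × String)) (seq_to_align : String) : Int :=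
  if seq_list.isEmpty then 0 else
  let sl := seq_list.map (fun ab => (ab.1, ab.2.toList))
  let table := pv_table sl
  let lo := (PySem.List.min? (sl.map (fun a_ => a_.1)) (fun x => x)).getD 0
              - (seq_to_align.toList.length : Int) + 1
  let hi := (PySem.List.max? (sl.map (fun a_ => a_.1 + (a_.2.length : Int))) (fun x => x)).getD 0 - 1
  ((PySem.List.pyRange lo hi 1).foldl
    (fun st i =>
      let score := (PySem.List.enumerate seq_to_align.toList 0).foldl
        (fun sc pch => if pch.2 ≠ ' ' then sc + table.getD (i + pch.1, pch.2) 0 else sc) 0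
      if score > st.1 then (score, i) else st) ((0 : Int), (0 : Int))).2

-- ===== PRECONDITION & SPEC =====
def Spec_find_alignment_index_py (seq_list : List (Int × String)) (seq_to_align : String) (out : Int) : Prop := out = find_alignment_index_py_alt seq_list seq_to_align
instance (seq_list : List (Int × String)) (seq_to_align : String) (out : Int) : Decidable (Spec_find_alignment_index_py seq_list seq_to_align out) := by unfold Spec_find_alignment_index_py; infer_instance

-- ===== CLAIM (what is proved, stated in full; the proofs are below) =====
def Claim_equal_find_alignment_index_py : Prop := ∀ (seq_list : List (Int × String)) (seq_to_align : String), Dom_find_alignment_index_py seq_list seq_to_align → Spec_find_alignment_index_py seq_list seq_to_align (find_alignment_index_py seq_list seq_to_align)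


-- ===== LEMMAS AND PROOFS =====

-- does sequence ab carry character c ≠ ' ' at absolute position q?
def pvHit (q : Int) (c : Char) (ab : Int × List Char) : Bool :=
  decide (0 ≤ q - ab.1) && (ab.2.getD (q - ab.1).toNat ' ' == c)

-- number of sequences matching character c at absolute position q
def pvCnt (sl : List (Int × List Char)) (q : Int) (c : Char) : Int :=
  (sl.countP (pvHit q c) : Int)

-- reference score: sum of per-position match counts, query anchored at q
def pvSpecScore (cnt : Int → Char → Int) : List Char → Int → Int
  | [], _ => 0
  | c :: tl, q => (if c ≠ ' ' then cnt q c else 0) + pvSpecScore cnt tl (q + 1)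

-- the non-space events of one sequence, as (absolute position, char) pairs
def pvEvts (ab : Int × List Char) : List (Int × Char) :=
  ((PySem.List.enumerate ab.2 0).filter (fun kc => kc.2 ≠ ' ')).map (fun kc => (ab.1 + kc.1, kc.2))

theorem pv_drop_zip {α β : Type} (l1 : List α) (l2 : List β) (n : Nat) :
    (l1.zip l2).drop n = (l1.drop n).zip (l2.drop n) := by
  induction l1 generalizing l2 n with
  | nil => simp
  | cons a t ih =>
    cases l2 with
    | nil => simp
    | cons b t2 => cases n with
      | zero => simp
      | succ m => simpa using ih t2 m

theorem pv_foldl_if_insert (l : List (Int × Char)) (p : Int × Char → Prop) [DecidablePred p]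
    (f : Int × Char → Int × Char) (d : PySem.Dict (Int × Char) Int) :
    l.foldl (fun d x => if p x then d.insert (f x) (d.getD (f x) 0 + 1) else d) d
      = ((l.filter (fun x => p x)).map f).foldl (fun d y => d.insert y (d.getD y 0 + 1)) d := by
  induction l generalizing d with
  | nil => rfl
  | cons x t ih =>
    simp only [List.foldl_cons, List.filter_cons]
    by_cases hp : p x <;> simp [hp, ih]

theorem pv_countP_enum (cs : List Char) (k : Int) (c : Char) (hc : c ≠ ' ') :
    ∀ (s : Int), (PySem.List.enumerate cs s).countP (fun kc => decide (kc.1 = k) && (kc.2 == c))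
      = if 0 ≤ k - s ∧ cs.getD (k - s).toNat ' ' = c then 1 else 0 := by
  induction cs with
  | nil =>
    intro s
    simp only [PySem.List.enumerate, List.countP_nil, List.getD]
    rw [if_neg (by rintro ⟨-, h2⟩; simp at h2; exact hc h2.symm)]
  | cons ch tl ih =>
    intro s
    rw [PySem.List.enumerate_cons, List.countP_cons, ih (s+1)]
    simp only [Bool.and_eq_true, decide_eq_true_eq, beq_iff_eq]
    rcases lt_trichotomy (k - s) 0 with h | h | h
    · rw [if_neg (by rintro ⟨h1, -⟩; omega : ¬(0 ≤ k - (s+1) ∧ tl.getD (k - (s+1)).toNat ' ' = c)),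
        if_neg (by rintro ⟨h1, -⟩; omega : ¬((s, ch).1 = k ∧ (s, ch).2 = c)),
        if_neg (by rintro ⟨h1, -⟩; omega : ¬(0 ≤ k - s ∧ (ch :: tl).getD (k - s).toNat ' ' = c))]
    · have h0 : (k - s).toNat = 0 := by omega
      rw [if_neg (by rintro ⟨h1, -⟩; omega : ¬(0 ≤ k - (s+1) ∧ tl.getD (k - (s+1)).toNat ' ' = c)),
        h0]
      simp only [List.getD_cons_zero]
      by_cases hcc : ch = c
      · rw [if_pos ⟨by omega, hcc⟩, if_pos ⟨by omega, hcc⟩]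
      · rw [if_neg (by rintro ⟨-, h2⟩; exact hcc h2 : ¬((s, ch).1 = k ∧ (s, ch).2 = c)),
          if_neg (by rintro ⟨-, h2⟩; exact hcc h2)]
    · rw [if_neg (by rintro ⟨h1, -⟩; omega : ¬((s, ch).1 = k ∧ (s, ch).2 = c)),
        show (k - s).toNat = (k - (s+1)).toNat + 1 from by omega, List.getD_cons_succ, add_zero]
      exact if_congr ⟨fun ⟨h1, h2⟩ => ⟨by omega, h2⟩, fun ⟨h1, h2⟩ => ⟨by omega, h2⟩⟩ rfl rfl

theorem pv_count_evts (ab : Int × List Char) (q : Int) (c : Char) (hc : c ≠ ' ') :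
    (pvEvts ab).count (q, c) = if pvHit q c ab then 1 else 0 := by
  unfold pvEvts
  rw [List.count_eq_countP, List.countP_map, List.countP_filter]
  have hcongr : ∀ kc ∈ PySem.List.enumerate ab.2 0,
      (((fun x => x == (q, c)) ∘ fun kc => (ab.1 + kc.1, kc.2)) kc && decide (kc.2 ≠ ' '))
        = (decide (kc.1 = q - ab.1) && (kc.2 == c)) := by
    intro kc _
    rw [Bool.eq_iff_iff]
    simp only [Function.comp, Bool.and_eq_true, beq_iff_eq, decide_eq_true_eq, Prod.mk.injEq]
    constructor
    · rintro ⟨⟨h1, h2⟩, h3⟩; exact ⟨by omega, h2⟩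
    · rintro ⟨h1, h2⟩; exact ⟨⟨by omega, h2⟩, by simp [h2, hc]⟩
  rw [List.countP_congr (by intro kc hkc; rw [hcongr kc hkc]),
    pv_countP_enum ab.2 (q - ab.1) c hc 0]
  simp only [sub_zero, pvHit, Bool.and_eq_true, decide_eq_true_eq, beq_iff_eq]

theorem pv_table_eq (sl : List (Int × List Char)) :
    pv_table sl = (sl.flatMap pvEvts).foldl (fun d y => d.insert y (d.getD y 0 + 1)) PySem.Dict.empty := by
  rw [List.foldl_flatMap]
  unfold pv_table
  apply PySem.List.foldl_congr_mem
  intro d ab _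
  exact pv_foldl_if_insert _ (fun kc => kc.2 ≠ ' ') (fun kc => (ab.1 + kc.1, kc.2)) d

theorem pv_sum_ind (p : (Int × List Char) → Bool) (t : List (Int × List Char)) :
    (t.map (fun ab => if p ab then 1 else 0)).sum = t.countP p := by
  induction t with
  | nil => rfl
  | cons ab tl ih => rw [List.map_cons, List.sum_cons, List.countP_cons, ih, Nat.add_comm]

theorem pv_table_getD (sl : List (Int × List Char)) (q : Int) (c : Char) (hc : c ≠ ' ') :
    (pv_table sl).getD (q, c) 0 = pvCnt sl q c := by
  rw [pv_table_eq, PySem.Dict.getD_foldl_insert_add_one, PySem.Dict.getD_empty,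
    List.count_flatMap, zero_add, pvCnt]
  have h1 : sl.map (List.count (q, c) ∘ pvEvts) = sl.map (fun ab => if pvHit q c ab then 1 else 0) :=
    List.map_congr_left (fun ab _ => pv_count_evts ab q c hc)
  rw [h1, pv_sum_ind]

theorem pv_pad_getD (a m : Int) (b : List Char) (j : Nat) (c : Char) (hm : m ≤ a) (hc : c ≠ ' ') :
    ((List.replicate (a - m).toNat ' ' ++ b).getD j ' ' = c) ↔ pvHit (m + j) c (a, b) = true := by
  have hr : ((a - m).toNat : Int) = a - m := by omega
  unfold pvHit
  simp only [Bool.and_eq_true, decide_eq_true_eq, beq_iff_eq]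
  by_cases hj : j < (a - m).toNat
  · rw [List.getD_eq_getElem?_getD, List.getElem?_append_left (by simpa using hj),
      List.getElem?_replicate, if_pos hj]
    simp only [Option.getD_some]
    constructor
    · intro h; exact absurd h.symm hc
    · rintro ⟨h1, -⟩; omega
  · rw [List.getD_eq_getElem?_getD, List.getElem?_append_right (by simpa using not_lt.mp hj)]
    have h1 : 0 ≤ m + j - a := by omega
    have h2 : (m + (j : Int) - a).toNat = j - (List.replicate (a - m).toNat ' ').length := by
      simp only [List.length_replicate]; omega
    rw [← List.getD_eq_getElem?_getD]
    constructor
    · intro h; exact ⟨h1, by rw [h2]; exact h⟩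
    · rintro ⟨-, h⟩; rw [h2] at h; exact h

theorem pv_col_count (sl : List (Int × List Char)) (m : Int) (hm : ∀ ab ∈ sl, m ≤ ab.1)
    (j : Nat) (c : Char) (hc : c ≠ ' ') :
    ((pv_pad_seq_list (sl.map (fun ab => (ab.1 - m, ab.2)))).map (fun pl => pl.getD j ' ')).count c
      = sl.countP (pvHit (m + j) c) := by
  unfold pv_pad_seq_list
  rw [List.map_map, List.map_map, List.count_eq_countP, List.countP_map]
  apply List.countP_congr
  intro ab hab
  simp only [Function.comp, beq_iff_eq]
  simpa using pv_pad_getD ab.1 m ab.2 j c (hm ab hab) hc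

theorem pv_hit_false (ab : Int × List Char) (q : Int) (c : Char) (hc : c ≠ ' ')
    (h : (ab.1 + ab.2.length : Int) ≤ q) : pvHit q c ab = false := by
  unfold pvHit
  have hlen : ab.2.length ≤ (q - ab.1).toNat := by omega
  rw [List.getD_eq_getElem?_getD, List.getElem?_eq_none hlen]
  simp [Ne.symm hc]

theorem pvSpecScore_zero (cnt : Int → Char → Int) (s : List Char) :
    ∀ (q : Int), (∀ q' c, q ≤ q' → c ≠ ' ' → cnt q' c = 0) → pvSpecScore cnt s q = 0 := by
  induction s with
  | nil => intro q h; rfl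
  | cons c tl ih =>
    intro q h
    unfold pvSpecScore
    rw [ih (q+1) (fun q' c hq hc => h q' c (by omega) hc)]
    by_cases hc : c = ' ' <;> simp [hc, h q c le_rfl]

theorem pvSpecScore_congr (cnt₁ cnt₂ : Int → Char → Int)
    (h : ∀ q c, c ≠ ' ' → cnt₁ q c = cnt₂ q c) (s : List Char) :
    ∀ (q : Int), pvSpecScore cnt₁ s q = pvSpecScore cnt₂ s q := by
  induction s with
  | nil => intro q; rfl
  | cons c tl ih =>
    intro q
    unfold pvSpecScore
    rw [ih (q+1)]
    by_cases hc : c = ' ' <;> simp [hc, h q c]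

theorem pv_foldl_max_init (l : List (List Char)) :
    ∀ (a : Nat), a ≤ l.foldl (fun acc s => max acc s.length) a
      ∧ ∀ x ∈ l, x.length ≤ l.foldl (fun acc s => max acc s.length) a := by
  induction l with
  | nil => intro a; exact ⟨le_rfl, by simp⟩
  | cons y t ih =>
    intro a
    constructor
    · exact le_trans (le_max_left a y.length) (ih (max a y.length)).1
    · intro x hx
      rcases List.mem_cons.mp hx with h | h
      · subst h; exact le_trans (le_max_right a x.length) (ih _).1
      · exact (ih _).2 x h

theorem pv_sum_zip (s : List Char) :
    ∀ (col : Nat → List Char) (cnt : Int → Char → Int) (W : Nat) (q : Int),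
    (∀ (p : Nat) c, c ≠ ' ' → ((col p).count c : Int) = cnt (q + p) c) →
    (∀ (p : Nat) c, c ≠ ' ' → W ≤ p → cnt (q + p) c = 0) →
    ((s.zip ((List.range W).map col)).map
        (fun x => if x.1 ≠ ' ' then (x.2.count x.1 : Int) else 0)).sum
      = pvSpecScore cnt s q := by
  induction s with
  | nil => intro col cnt W q _ _; simp [pvSpecScore]
  | cons c tl ih =>
    intro col cnt W q hlink hvan
    cases W with
    | zero =>
      simp only [List.range_zero, List.map_nil, List.zip_nil_right, List.map_nil, List.sum_nil]
      refine (pvSpecScore_zero cnt (c :: tl) q fun q' c' hq hc' => ?_).symm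
      have := hvan (q' - q).toNat c' hc' (Nat.zero_le _)
      rwa [show q + ((q' - q).toNat : Int) = q' from by omega] at this
    | succ W' =>
      rw [List.range_succ_eq_map, List.map_cons, List.map_map, List.zip_cons_cons,
        List.map_cons, List.sum_cons,
        ih (col ∘ Nat.succ) cnt W' (q + 1)
          (fun p c hc => by
            have := hlink (p + 1) c hc
            push_cast at this ⊢
            rw [show q + ((p : Int) + 1) = (q + 1) + p from by ring] at this
            simpa using this)
          (fun p c hc hp => by
            have := hvan (p + 1) c hc (by omega)
            push_cast at this ⊢
            rw [show q + ((p : Int) + 1) = (q + 1) + p from by ring] at this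
            simpa using this)]
      show _ = pvSpecScore cnt (c :: tl) q
      rw [pvSpecScore]
      congr 1
      by_cases hc : c = ' '
      · simp [hc]
      · simp only [hc, if_pos, ne_eq, not_false_iff]
        have := hlink 0 c hc
        simpa using this

theorem pv_calc_score_eq (sl : List (Int × List Char)) (s : List Char) (i : Int) (hne : sl ≠ []) :
    pv_calc_score sl s i = pvSpecScore (pvCnt sl) s i := by
  simp only [pv_calc_score]
  set m := min ((PySem.List.min? (sl.map (fun a_ => a_.1)) (fun x => x)).getD 0) i with hm
  set padded := pv_pad_seq_list (sl.map (fun ab => (ab.1 - m, ab.2))) with hpad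
  set W := padded.foldl (fun acc s => max acc s.length) 0 with hW
  have hmi : m ≤ i := min_le_right _ i
  have hlensl : padded.length = sl.length := by rw [hpad]; simp [pv_pad_seq_list]
  have hslpos : 0 < sl.length := List.length_pos_of_ne_nil hne
  have hz : (if padded.length > 1 then pvZipLongest padded
        else (padded.getD 0 []).map (fun a => [a]))
      = (List.range W).map (fun j => padded.map (fun pl => pl.getD j ' ')) := by
    by_cases hl : padded.length > 1
    · rw [if_pos hl, pvZipLongest, ← hW]
    · have hlen : padded.length = 1 := by omega
      obtain ⟨x, hx⟩ := List.length_eq_one_iff.mp hlen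
      rw [if_neg hl, hx, hW, hx]
      simp only [List.foldl_cons, List.foldl_nil, List.getD_cons_zero, Nat.zero_max]
      apply List.ext_getElem
      · simp
      · intro j h1 h2
        simp only [List.getElem_map, List.getElem_range, List.map_cons, List.map_nil]
        rw [List.getD_eq_getElem x ' ' (by simpa using h1)]
  rw [hz, PySem.List.slice_from _ (by omega : (0:Int) ≤ i - m), ← List.map_drop, pv_drop_zip,
    List.drop_left' (by simp : (List.replicate (i - m).toNat ' ').length = (i - m).toNat)]
  have hmle : ∀ ab ∈ sl, m ≤ ab.1 := by
    intro ab hab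
    cases hmin : PySem.List.min? (sl.map (fun a_ => a_.1)) (fun x => x) with
    | none =>
      exact absurd (List.map_eq_nil_iff.mp ((PySem.List.min?_eq_none_iff _ _).mp hmin)) hne
    | some v =>
      have h1 := PySem.List.min?_isMin hmin ab.1 (List.mem_map_of_mem hab)
      rw [hm, hmin]
      simp only [Option.getD_some]
      exact le_trans (min_le_left _ _) h1
  have hWb : ∀ ab ∈ sl, (ab.1 + ab.2.length : Int) ≤ m + W := by
    intro ab hab
    have hmem : (List.replicate (ab.1 - m).toNat ' ' ++ ab.2) ∈ padded := by
      rw [hpad]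
      exact List.mem_map_of_mem (List.mem_map_of_mem hab)
    have hle := (pv_foldl_max_init padded 0).2 _ hmem
    rw [← hW] at hle
    have hl2 : (List.replicate (ab.1 - m).toNat ' ' ++ ab.2).length
        = (ab.1 - m).toNat + ab.2.length := by simp
    have := hmle ab hab
    omega
  have hvan' : ∀ q c, c ≠ ' ' → m + W ≤ q → pvCnt sl q c = 0 := by
    intro q c hc hq
    unfold pvCnt
    rw [List.countP_eq_zero.mpr (fun ab hab => by
      simp [pv_hit_false ab q c hc (le_trans (hWb ab hab) hq)])]
    rfl
  by_cases hcase : (i - m).toNat ≤ W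
  · rw [show W = (i - m).toNat + (W - (i - m).toNat) from by omega, List.range_add,
      List.map_append,
      List.drop_left' (by simp : ((List.range (i - m).toNat).map
        (fun j => List.map (fun pl => pl.getD j ' ') padded)).length = (i - m).toNat),
      List.map_map]
    apply pv_sum_zip
    · intro p c hc
      simp only [Function.comp]
      rw [hpad, pv_col_count sl m hmle ((i - m).toNat + p) c hc,
        show m + (((i - m).toNat + p : Nat) : Int) = i + p from by push_cast; omega]
      rfl
    · intro p c hc hp
      apply hvan' _ _ hc
      omega
  · rw [List.drop_eq_nil_of_le (by simp; omega), List.zip_nil_right, List.map_nil, List.sum_nil]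
    refine (pvSpecScore_zero (pvCnt sl) s i fun q' c hq hc => hvan' q' c hc (by omega)).symm

theorem pv_fold_score (s : List Char) (cnt : Int → Char → Int) (i : Int) :
    ∀ (st acc : Int),
    (PySem.List.enumerate s st).foldl
        (fun sc pch => if pch.2 ≠ ' ' then sc + cnt (i + pch.1) pch.2 else sc) acc
      = acc + pvSpecScore cnt s (i + st) := by
  induction s with
  | nil => intro st acc; simp [PySem.List.enumerate, pvSpecScore]
  | cons c tl ih =>
    intro st acc
    rw [PySem.List.enumerate_cons, List.foldl_cons, ih (st+1)]
    show _ = acc + pvSpecScore cnt (c :: tl) (i + st)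
    rw [pvSpecScore]
    have h2 : i + (st + 1) = (i + st) + 1 := by ring
    rw [h2]
    split_ifs <;> ring

-- ===== VERDICT (by name: the statement is the Claim_ definition above) =====
theorem find_alignment_index_py_spec : Claim_equal_find_alignment_index_py := by
  intro seq_list seq_to_align _dom
  unfold Spec_find_alignment_index_py find_alignment_index_py find_alignment_index_py_alt
  by_cases h : seq_list = []
  · subst h; simp
  · rw [if_neg (by simp [h]), if_neg (by simp [h])]
    simp only [pv_get_closest, pv_get_furthest]
    refine congrArg Prod.snd ?_
    apply PySem.List.foldl_congr_mem
    intro st j _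
    show (if pv_calc_score (seq_list.map (fun ab => (ab.1, ab.2.toList))) seq_to_align.toList j > st.1
        then (pv_calc_score (seq_list.map (fun ab => (ab.1, ab.2.toList))) seq_to_align.toList j, j) else st)
      = (if ((PySem.List.enumerate seq_to_align.toList 0).foldl
            (fun sc pch => if pch.2 ≠ ' '
              then sc + (pv_table (seq_list.map (fun ab => (ab.1, ab.2.toList)))).getD (j + pch.1, pch.2) 0
              else sc) 0) > st.1
        then (((PySem.List.enumerate seq_to_align.toList 0).foldl
            (fun sc pch => if pch.2 ≠ ' '
              then sc + (pv_table (seq_list.map (fun ab => (ab.1, ab.2.toList)))).getD (j + pch.1, pch.2) 0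
              else sc) 0), j) else st)
    rw [pv_calc_score_eq _ _ j (by simp [h]),
      pv_fold_score seq_to_align.toList
        (fun q c => (pv_table (seq_list.map (fun ab => (ab.1, ab.2.toList)))).getD (q, c) 0) j 0 0,
      zero_add, add_zero,
      pvSpecScore_congr _ _
        (fun q c hc => (pv_table_getD (seq_list.map (fun ab => (ab.1, ab.2.toList))) q c hc).symm)
        seq_to_align.toList j]
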